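-- pv_equiv track=rewrite | github.com/thisishwan2/Algorithm | programmers/Level2/PCCP 모의고사 1회 3번.py | solution
-- ===== SOURCE A (Python) =====
-- def solution(queries):
--     answer = []
--
--     for i in queries:
--         n = i[0]  # 세대
--         idx = i[1] - 1  # 위치
--         lst = []  # 자식부터 부모까지(2세대) 타고 가면서 각 세대에서의 위치를 넣는다. ex: 만약 4세대 정보를 줬다면 [3세대 위치, 2세대 위치]
--
--         # 1세대가 되면 탈출함
--         while n > 1:
--             lst.append(idx % 4)  #
--             idx = idx // 4
--             n -= 1
--
--         # Rr 체크용
--         check = False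
--
--         # 2세대부터 어느 위치인지 확인하면서, 한번이라도 맨끝(각 자식 노드의 맨끝은 항상 RR 아님 rr임)을 확인한다.
--         while len(lst) > 0:
--             num = lst.pop()
--             if num == 0:
--                 check = True
--                 answer.append("RR")
--                 break
--             elif num == 3:
--                 check = True
--                 answer.append("rr")
--                 break
--         # 한번도 RR,rr 을 못만났으면 그건 Rr이다.
--         if check == False:
--             answer.append("Rr")
--
--     return answer
-- ===== SOURCE B (Python) =====
-- def solution(queries):
--     answer = []
--     for q in queries:
--         n = q[0]
--         idx = q[1] - 1
--         label = "Rr"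
--         if n >= 2:
--             pw = 4 ** (n - 2)
--             while pw > 0:
--                 d = (idx // pw) % 4
--                 if d == 0:
--                     label = "RR"
--                     break
--                 if d == 3:
--                     label = "rr"
--                     break
--                 pw //= 4
--         answer.append(label)
--     return answer
-- ===== Notes on version B (the rewrite author's own statement) =====
-- stated objective: faster
-- what changed: Per query, instead of materialising the full LSB-first base-4 digit list and then popping it from the end, B scans the digits most-significant-first directly via a descending power-of-4 divisor and stops at the first 0 or 3; no intermediate list is built.
-- outside the precondition, e.g. on solution([[5]]): A raises IndexError, B raises IndexError
import Mathlib
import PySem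

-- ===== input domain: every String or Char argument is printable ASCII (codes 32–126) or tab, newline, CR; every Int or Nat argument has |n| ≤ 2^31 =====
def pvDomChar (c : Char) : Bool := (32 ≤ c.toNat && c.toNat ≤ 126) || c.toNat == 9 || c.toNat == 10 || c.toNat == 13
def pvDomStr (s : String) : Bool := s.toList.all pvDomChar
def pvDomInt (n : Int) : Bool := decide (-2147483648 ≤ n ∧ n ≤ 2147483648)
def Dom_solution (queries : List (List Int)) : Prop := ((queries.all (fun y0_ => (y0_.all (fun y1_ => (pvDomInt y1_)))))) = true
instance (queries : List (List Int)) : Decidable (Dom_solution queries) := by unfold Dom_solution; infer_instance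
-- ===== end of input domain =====

-- B replaces A's build-LSB-list-then-pop scheme by a single most-significant-first scan per query
-- (no intermediate list); equivalence is about the return value only (A mutates no argument).

-- ===== PORT A =====
-- while n > 1: lst.append(idx % 4); idx //= 4; n -= 1   (fuel = number of iterations = (n-1).toNat)
def aDigits : Nat → Int → List Int → List Int
  | 0, _, lst => lst
  | f + 1, idx, lst => aDigits f (PySem.Int.floordiv idx 4) (lst ++ [PySem.Int.mod idx 4])

-- while len(lst) > 0: num = lst.pop(); …  — pop from the end = walk the reversed list
def aPop : List Int → Option String
  | [] => none
  | num :: rest =>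
    if num = 0 then some "RR"
    else if num = 3 then some "rr"
    else aPop rest

def solution (queries : List (List Int)) : List String :=
  queries.foldl (fun answer i =>
    let n := (PySem.List.pyGet? i 0).getD 0
    let idx := (PySem.List.pyGet? i 1).getD 0 - 1
    let lst := aDigits (n - 1).toNat idx []
    match aPop lst.reverse with
    | some s => answer ++ [s]
    | none => answer ++ ["Rr"]) []

-- ===== PORT B =====
-- while pw > 0: d = (idx // pw) % 4; …; pw //= 4
def bLoop (pw idx : Int) : String :=
  if _h : 0 < pw then
    let d := PySem.Int.mod (PySem.Int.floordiv idx pw) 4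
    if d = 0 then "RR"
    else if d = 3 then "rr"
    else bLoop (PySem.Int.floordiv pw 4) idx
  else "Rr"
termination_by pw.toNat
decreasing_by
  have he : PySem.Int.floordiv pw 4 = pw / 4 := PySem.Int.floordiv_eq_ediv_of_pos (by omega)
  rw [he]; omega

def solution_alt (queries : List (List Int)) : List String :=
  queries.map (fun q =>
    let n := (PySem.List.pyGet? q 0).getD 0
    let idx := (PySem.List.pyGet? q 1).getD 0 - 1
    if 2 ≤ n then bLoop (4 ^ (n - 2).toNat) idx else "Rr")

-- ===== PRECONDITION & SPEC =====
-- Pre_ excludes exactly the queries shorter than 2 elements, on which A's i[1] raises IndexError.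
def Pre_solution (queries : List (List Int)) : Prop := ∀ q ∈ queries, 2 ≤ q.length
instance (queries : List (List Int)) : Decidable (Pre_solution queries) := by
  unfold Pre_solution; infer_instance

def pvWitness_solution : List (List Int) := [[3, 5], [2, 4], [1, 1]]

def Spec_solution (queries : List (List Int)) (out : List String) : Prop := out = solution_alt queries
instance (queries : List (List Int)) (out : List String) : Decidable (Spec_solution queries out) := by
  unfold Spec_solution; infer_instance

-- ===== CLAIM (what is proved, stated in full; the proofs are below) =====
def Claim_equal_solution : Prop := ∀ (queries : List (List Int)), Dom_solution queries → Pre_solution queries → Spec_solution queries (solution queries)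

-- ===== LEMMAS AND PROOFS =====

theorem aDigits_acc (f : Nat) : ∀ (idx : Int) (lst : List Int),
    aDigits f idx lst = lst ++ aDigits f idx [] := by
  induction f with
  | zero => intro idx lst; simp [aDigits]
  | succ k ih =>
    intro idx lst
    rw [aDigits, aDigits, ih _ (lst ++ _), ih _ ([] ++ _)]
    simp

theorem floordiv_floordiv_pow (idx : Int) (f : Nat) :
    PySem.Int.floordiv (PySem.Int.floordiv idx 4) (4 ^ f) = PySem.Int.floordiv idx (4 ^ (f + 1)) := by
  rw [PySem.Int.floordiv_eq_ediv_of_pos (b := 4) (by omega),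
      PySem.Int.floordiv_eq_ediv_of_pos (by positivity),
      PySem.Int.floordiv_eq_ediv_of_pos (by positivity),
      Int.ediv_ediv_of_nonneg (by omega : (0:Int) ≤ 4)]
  congr 1
  ring

theorem aDigits_snoc (f : Nat) : ∀ (idx : Int),
    aDigits (f + 1) idx [] =
      aDigits f idx [] ++ [PySem.Int.mod (PySem.Int.floordiv idx (4 ^ f)) 4] := by
  induction f with
  | zero =>
    intro idx
    simp [aDigits]
  | succ k ih =>
    intro idx
    conv_lhs => rw [aDigits, aDigits_acc (k + 1), ih, floordiv_floordiv_pow]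
    conv_rhs => rw [aDigits, aDigits_acc k]
    simp

-- the label A produces for one query, as a function of the loop count f = (n-1).toNat
def labelA (f : Nat) (idx : Int) : String :=
  match aPop (aDigits f idx []).reverse with
  | some s => s
  | none => "Rr"

theorem labelA_zero (idx : Int) : labelA 0 idx = "Rr" := by
  simp [labelA, aDigits, aPop]

theorem labelA_succ (k : Nat) (idx : Int) :
    labelA (k + 1) idx =
      (let d := PySem.Int.mod (PySem.Int.floordiv idx (4 ^ k)) 4
       if d = 0 then "RR" else if d = 3 then "rr" else labelA k idx) := by
  rw [labelA, aDigits_snoc]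
  simp only [List.reverse_append, List.reverse_cons, List.reverse_nil, List.nil_append,
    List.cons_append, aPop]
  split_ifs <;> simp [labelA]

theorem bLoop_nonpos (pw idx : Int) (h : ¬ 0 < pw) : bLoop pw idx = "Rr" := by
  rw [bLoop]; simp [h]

theorem bLoop_eq_labelA (k : Nat) (idx : Int) : bLoop (4 ^ k) idx = labelA (k + 1) idx := by
  induction k generalizing idx with
  | zero =>
    rw [bLoop, labelA_succ]
    have h1 : PySem.Int.floordiv ((1 : Int)) 4 = 0 := by
      rw [PySem.Int.floordiv_eq_ediv_of_pos (by omega)]; decide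
    have h2 : bLoop 0 idx = "Rr" := bLoop_nonpos 0 idx (by omega)
    simp only [pow_zero, h1, h2, labelA_zero]
    norm_num
  | succ m ih =>
    rw [bLoop, labelA_succ]
    have h4 : PySem.Int.floordiv ((4 : Int) ^ (m + 1)) 4 = 4 ^ m := by
      rw [PySem.Int.floordiv_eq_ediv_of_pos (by omega), pow_succ]
      exact Int.mul_ediv_cancel _ (by omega)
    simp only [h4, ih]
    have hp : (0 : Int) < 4 ^ (m + 1) := by positivity
    simp [hp]

theorem perQuery_eq (i : List Int) :
    (let n := (PySem.List.pyGet? i 0).getD 0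
     let idx := (PySem.List.pyGet? i 1).getD 0 - 1
     labelA (n - 1).toNat idx)
    = (let n := (PySem.List.pyGet? i 0).getD 0
       let idx := (PySem.List.pyGet? i 1).getD 0 - 1
       if 2 ≤ n then bLoop (4 ^ (n - 2).toNat) idx else "Rr") := by
  simp only []
  set n := (PySem.List.pyGet? i 0).getD 0 with hn
  by_cases h2 : 2 ≤ n
  · have hf : (n - 1).toNat = (n - 2).toNat + 1 := by omega
    rw [hf, ← bLoop_eq_labelA, if_pos h2]
  · have hf : (n - 1).toNat = 0 := by omega
    rw [hf, labelA_zero, if_neg h2]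

-- ===== VERDICT (by name: the statement is the Claim_ definition above) =====
theorem solution_spec : Claim_equal_solution := by
  intro queries _ _
  show solution queries = solution_alt queries
  unfold solution solution_alt
  have hbody : ∀ (answer : List String) (i : List Int),
      (let n := (PySem.List.pyGet? i 0).getD 0
       let idx := (PySem.List.pyGet? i 1).getD 0 - 1
       let lst := aDigits (n - 1).toNat idx []
       match aPop lst.reverse with
       | some s => answer ++ [s]
       | none => answer ++ ["Rr"])
      = answer ++ [(let n := (PySem.List.pyGet? i 0).getD 0
                    let idx := (PySem.List.pyGet? i 1).getD 0 - 1
                    if 2 ≤ n then bLoop (4 ^ (n - 2).toNat) idx else "Rr")] := by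
    intro answer i
    rw [← perQuery_eq]
    simp only [labelA]
    rcases h : aPop (aDigits ((PySem.List.pyGet? i 0).getD 0 - 1).toNat
        ((PySem.List.pyGet? i 1).getD 0 - 1) []).reverse with _ | s <;> simp
  calc queries.foldl (fun answer i =>
        let n := (PySem.List.pyGet? i 0).getD 0
        let idx := (PySem.List.pyGet? i 1).getD 0 - 1
        let lst := aDigits (n - 1).toNat idx []
        match aPop lst.reverse with
        | some s => answer ++ [s]
        | none => answer ++ ["Rr"]) []
      = queries.foldl (fun answer i =>
          answer ++ [(let n := (PySem.List.pyGet? i 0).getD 0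
                      let idx := (PySem.List.pyGet? i 1).getD 0 - 1
                      if 2 ≤ n then bLoop (4 ^ (n - 2).toNat) idx else "Rr")]) [] := by
        apply PySem.List.foldl_congr_mem
        intro acc i _
        exact hbody acc i
    _ = _ := by
        rw [PySem.List.foldl_append_singleton_eq_map]
        simp
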